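-- pv_equiv track=rewrite | github.com/vuanhtuan1012/algorithms | high_school/de_2024_12_28/bai23.py | tim_day_con_dai_nhat
-- ===== SOURCE A (Python) =====
-- from typing import List
--
-- def tim_day_con_dai_nhat(sequences: List[List[int]]) -> List[int]:
--     """
--     Returns the longest subsequence from the given list of sequences
--     """
--     # get the max length
--     max_length = 0
--     for sequence in sequences:
--         max_length = max(max_length, len(sequence))
--
--     # get the longest subsequence
--     for subsequence in sequences:
--         if len(subsequence) == max_length:
--             return subsequence
--     return []
-- ===== SOURCE B (Python) =====
-- from typing import List
--
-- def tim_day_con_dai_nhat(sequences: List[List[int]]) -> List[int]: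
--     best: List[int] = []
--     best_len = 0
--     for sequence in sequences:
--         if len(sequence) > best_len:
--             best = sequence
--             best_len = len(sequence)
--     return best
-- ===== Notes on version B (the rewrite author's own statement) =====
-- stated objective: simpler
-- what changed: Replaces A's two passes (compute the max length, then rescan for the first sequence of that length) by one pass keeping the longest-so-far with a strict '>' so the first longest wins.
import Mathlib
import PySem

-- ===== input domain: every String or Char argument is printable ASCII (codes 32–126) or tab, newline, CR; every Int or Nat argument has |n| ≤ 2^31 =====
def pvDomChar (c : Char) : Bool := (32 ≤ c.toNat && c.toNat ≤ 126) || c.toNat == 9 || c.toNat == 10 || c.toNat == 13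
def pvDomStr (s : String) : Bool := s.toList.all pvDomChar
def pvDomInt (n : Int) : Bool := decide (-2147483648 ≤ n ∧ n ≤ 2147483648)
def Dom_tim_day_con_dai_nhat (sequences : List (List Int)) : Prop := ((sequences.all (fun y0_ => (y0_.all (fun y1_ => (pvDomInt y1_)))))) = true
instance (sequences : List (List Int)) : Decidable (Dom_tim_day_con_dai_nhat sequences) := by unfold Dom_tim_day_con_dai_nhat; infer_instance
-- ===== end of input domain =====

-- B replaces A's two passes (max length, then rescan for the first match) by a single pass keeping the longest-so-far (simpler).


-- ===== PORT A =====
-- first loop of A: max_length = max over lengths, accumulator style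
def pvMaxLen : List (List Int) → Nat → Nat
  | [], m => m
  | s :: r, m => pvMaxLen r (max m s.length)

-- second loop of A: return the first subsequence of length m, else []
def pvFind : List (List Int) → Nat → List Int
  | [], _ => []
  | s :: r, m => if s.length = m then s else pvFind r m

def tim_day_con_dai_nhat (sequences : List (List Int)) : List Int :=
  pvFind sequences (pvMaxLen sequences 0)

-- ===== PORT B =====
-- single loop of B carrying (best, best_len)
def pvBest : List (List Int) → List Int × Nat → List Int × Nat
  | [], acc => acc
  | s :: r, (b, bl) => if s.length > bl then pvBest r (s, s.length) else pvBest r (b, bl)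

def tim_day_con_dai_nhat_alt (sequences : List (List Int)) : List Int :=
  (pvBest sequences ([], 0)).1

-- ===== PRECONDITION & SPEC =====
def Spec_tim_day_con_dai_nhat (sequences : List (List Int)) (out : List Int) : Prop := out = tim_day_con_dai_nhat_alt sequences
instance (sequences : List (List Int)) (out : List Int) : Decidable (Spec_tim_day_con_dai_nhat sequences out) := by unfold Spec_tim_day_con_dai_nhat; infer_instance

-- ===== CLAIM (what is proved, stated in full; the proofs are below) =====
def Claim_equal_tim_day_con_dai_nhat : Prop := ∀ (sequences : List (List Int)), Dom_tim_day_con_dai_nhat sequences → Spec_tim_day_con_dai_nhat sequences (tim_day_con_dai_nhat sequences)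

-- ===== LEMMAS AND PROOFS =====

theorem pvMaxLen_ge (l : List (List Int)) (x : Nat) : x ≤ pvMaxLen l x := by
  induction l generalizing x with
  | nil => simp [pvMaxLen]
  | cons s r ih =>
    have := ih (max x s.length)
    simp [pvMaxLen]
    omega

-- the single pass equals "if the max beats bl, the first sequence of max length, else the carried best"
theorem pvBest_eq (l : List (List Int)) (b : List Int) (bl : Nat) (hb : b.length = bl) :
    (pvBest l (b, bl)).1 = if pvMaxLen l bl = bl then b else pvFind l (pvMaxLen l bl) := by
  induction l generalizing b bl with
  | nil => simp [pvBest, pvMaxLen]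
  | cons s r ih =>
    simp only [pvBest, pvMaxLen]
    by_cases h : s.length > bl
    · simp only [if_pos h]
      have hmax : max bl s.length = s.length := by omega
      rw [hmax]
      rw [ih s s.length rfl]
      have hge := pvMaxLen_ge r s.length
      have hne : pvMaxLen r s.length ≠ bl := by omega
      rw [if_neg hne]
      simp only [pvFind]
      by_cases h2 : pvMaxLen r s.length = s.length
      · rw [if_pos h2, if_pos h2.symm]
      · rw [if_neg h2, if_neg (fun e => h2 e.symm)]
    · simp only [if_neg h]
      have hmax : max bl s.length = bl := by omega
      rw [hmax]
      rw [ih b bl hb]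
      by_cases h2 : pvMaxLen r bl = bl
      · simp [h2]
      · have hge := pvMaxLen_ge r bl
        have : s.length ≠ pvMaxLen r bl := by omega
        simp [pvFind, h2, this]

-- if the max length is 0, A's second loop returns [] (any found element has length 0)
theorem pvFind_zero (l : List (List Int)) : pvFind l 0 = [] := by
  induction l with
  | nil => rfl
  | cons s r ih =>
    simp only [pvFind]
    by_cases h : s.length = 0
    · simp [List.length_eq_zero_iff.mp h]
    · simp [h, ih]

-- ===== VERDICT (by name: the statement is the Claim_ definition above) =====
theorem tim_day_con_dai_nhat_spec : Claim_equal_tim_day_con_dai_nhat := by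
  intro l _
  unfold Spec_tim_day_con_dai_nhat tim_day_con_dai_nhat tim_day_con_dai_nhat_alt
  rw [pvBest_eq l [] 0 rfl]
  by_cases h : pvMaxLen l 0 = 0
  · simp [h, pvFind_zero]
  · simp [h]
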